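-- pv_equiv track=rewrite | github.com/Saltychtao/CWS | src/seg_sentence.py | ct2wt
-- ===== SOURCE A (Python) =====
-- def ct2wt(sentence):
--     wt_list = []
--     word = sentence[0][0]
--     tag = sentence[0][1]
--     for (c,t) in sentence[1:]:
--         if t == 'NotStart':
--             word += c
--         else:
--             wt_list.append((word,tag))
--             word = c
--             tag = t
--     wt_list.append((word,tag))
--     return wt_list
-- ===== SOURCE B (Python) =====
-- def ct2wt(sentence):
--     out = []
--     n = len(sentence)
--     i = 0
--     while i < n:
--         j = i + 1
--         while j < n and sentence[j][1] == 'NotStart':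
--             j += 1
--         out.append((''.join(c for c, _ in sentence[i:j]), sentence[i][1]))
--         i = j
--     return out
-- ===== Notes on version B (the rewrite author's own statement) =====
-- stated objective: alternative
-- what changed: Replaces A's single pass that grows a word/tag accumulator and appends at each boundary with a two-index segment scan: for each segment start i, an inner scan finds the segment end j, the word is joined from the slice sentence[i:j] and the tag read at sentence[i]; no word/tag state is carried across iterations.
import Mathlib
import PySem

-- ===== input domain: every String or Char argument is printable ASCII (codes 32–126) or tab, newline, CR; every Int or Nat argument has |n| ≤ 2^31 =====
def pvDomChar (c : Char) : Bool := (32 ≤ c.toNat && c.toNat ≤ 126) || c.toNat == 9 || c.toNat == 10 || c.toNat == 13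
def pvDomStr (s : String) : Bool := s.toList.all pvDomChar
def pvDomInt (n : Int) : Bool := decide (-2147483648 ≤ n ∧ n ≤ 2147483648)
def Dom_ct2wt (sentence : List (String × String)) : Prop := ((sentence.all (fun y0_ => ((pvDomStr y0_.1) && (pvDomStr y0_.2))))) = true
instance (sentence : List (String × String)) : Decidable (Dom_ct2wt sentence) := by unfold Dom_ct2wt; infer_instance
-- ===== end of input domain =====

-- B replaces A's word/tag-accumulator pass with a two-index segment scan (objective: alternative decomposition, same O(n) cost); A raises IndexError on the empty list, which Pre_ excludes.

-- ===== PORT A =====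
-- literal transliteration of A: word/tag accumulator folded over sentence[1:]
def ct2wt (sentence : List (String × String)) : List (String × String) :=
  match sentence with
  | [] => []  -- Python raises IndexError on sentence[0]; excluded by Pre_ct2wt
  | (c0, t0) :: rest =>
    let st := rest.foldl
      (fun (acc : List (String × String) × String × String) p =>
        if p.2 == "NotStart" then (acc.1, acc.2.1 ++ p.1, acc.2.2)
        else (acc.1 ++ [(acc.2.1, acc.2.2)], p.1, p.2))
      (([] : List (String × String)), c0, t0)
    st.1 ++ [(st.2.1, st.2.2)]

-- ===== PORT B =====
-- inner while loop of Source B: advance j while sentence[j][1] == 'NotStart'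
-- (the extra Nat argument is fuel, a structural totality guard; s.length - (i+1) always suffices)
def bInner (s : List (String × String)) (j : Nat) : Nat → Nat
  | 0 => j
  | fuel + 1 =>
    if h : j < s.length then
      if (s.get ⟨j, h⟩).2 == "NotStart" then bInner s (j + 1) fuel else j
    else j

-- outer while loop of Source B: for each segment start i, find end j, append joined slice
-- (the last Nat argument is fuel; s.length suffices since i strictly increases each iteration)
def bOuter (s : List (String × String)) (i : Nat) (out : List (String × String)) :
    Nat → List (String × String)
  | 0 => out
  | fuel + 1 =>
    if h : i < s.length then
      bOuter s (bInner s (i + 1) (s.length - (i + 1)))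
        (out ++ [(String.join (((s.drop i).take (bInner s (i + 1) (s.length - (i + 1)) - i)).map
            Prod.fst), (s.get ⟨i, h⟩).2)]) fuel
    else out

def ct2wt_alt (sentence : List (String × String)) : List (String × String) :=
  bOuter sentence 0 [] sentence.length

-- ===== PRECONDITION & SPEC =====
-- Pre_ excludes only the empty list, on which Python A raises IndexError.
def Pre_ct2wt (sentence : List (String × String)) : Prop := sentence ≠ []
instance (sentence : List (String × String)) : Decidable (Pre_ct2wt sentence) := by
  unfold Pre_ct2wt; infer_instance

def pvWitness_ct2wt : (List (String × String)) := [("a", "S"), ("b", "NotStart")]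

def Spec_ct2wt (sentence : List (String × String)) (out : List (String × String)) : Prop :=
  out = ct2wt_alt sentence
instance (sentence : List (String × String)) (out : List (String × String)) :
    Decidable (Spec_ct2wt sentence out) := by unfold Spec_ct2wt; infer_instance

-- ===== CLAIM (what is proved, stated in full; the proofs are below) =====
def Claim_equal_ct2wt : Prop := ∀ (sentence : List (String × String)),
  Dom_ct2wt sentence → Pre_ct2wt sentence → Spec_ct2wt sentence (ct2wt sentence)


-- ===== LEMMAS AND PROOFS =====

-- reference segmentation: structural recursion splitting off one maximal run at a time
def wordsB : List (String × String) → List (String × String)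
  | [] => []
  | (c, t) :: rest =>
    (c ++ String.join ((rest.takeWhile (fun p => p.2 == "NotStart")).map Prod.fst), t)
      :: wordsB (rest.dropWhile (fun p => p.2 == "NotStart"))
termination_by l => l.length
decreasing_by
  simp only [List.length_cons]
  have := List.length_dropWhile_le (fun p => p.2 == "NotStart") rest
  omega

theorem str_foldl_append (l : List String) (a : String) :
    l.foldl (· ++ ·) a = a ++ l.foldl (· ++ ·) "" := by
  induction l generalizing a with
  | nil => simp
  | cons x xs ih =>
    simp only [List.foldl_cons]
    rw [ih ("" ++ x), ih (a ++ x)]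
    simp [String.append_assoc]

theorem join_cons (a : String) (l : List String) :
    String.join (a :: l) = a ++ String.join l := by
  simp only [String.join, List.foldl_cons]
  rw [str_foldl_append]
  simp

theorem bInner_eq (s : List (String × String)) :
    ∀ (fuel j : Nat), s.length ≤ j + fuel →
      bInner s j fuel = j + ((s.drop j).takeWhile (fun p => p.2 == "NotStart")).length := by
  intro fuel
  induction fuel with
  | zero =>
    intro j hle
    have hd : s.drop j = [] := List.drop_eq_nil_of_le (by omega)
    simp [bInner, hd]
  | succ fuel ih =>
    intro j hle
    by_cases h : j < s.length
    · rw [List.drop_eq_getElem_cons h]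
      by_cases heq : (s[j].2 == "NotStart") = true
      · rw [List.takeWhile_cons_of_pos (p := fun p : String × String => p.2 == "NotStart") heq]
        have := ih (j + 1) (by omega)
        simp only [bInner, h, dif_pos, List.get_eq_getElem, heq, if_pos, List.length_cons]
        omega
      · rw [List.takeWhile_cons_of_neg (p := fun p : String × String => p.2 == "NotStart") (by simpa using heq)]
        simp [bInner, h, heq]
    · have hd : s.drop j = [] := List.drop_eq_nil_of_le (by omega)
      simp [bInner, h, hd]

theorem take_takeWhile_len {α : Type} (p : α → Bool) (l : List α) :
    l.take (l.takeWhile p).length = l.takeWhile p := by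
  induction l with
  | nil => simp
  | cons x xs ih =>
    by_cases h : p x
    · rw [List.takeWhile_cons_of_pos h]; simp [ih]
    · rw [List.takeWhile_cons_of_neg (by simpa using h)]; simp

theorem drop_takeWhile_len {α : Type} (p : α → Bool) (l : List α) :
    l.drop (l.takeWhile p).length = l.dropWhile p := by
  induction l with
  | nil => simp
  | cons x xs ih =>
    by_cases h : p x
    · rw [List.takeWhile_cons_of_pos h, List.dropWhile_cons_of_pos h]; simpa using ih
    · rw [List.takeWhile_cons_of_neg (by simpa using h), List.dropWhile_cons_of_neg (by simpa using h)]
      simp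

theorem bOuter_eq (s : List (String × String)) :
    ∀ (fuel i : Nat) (out : List (String × String)), s.length ≤ i + fuel →
      bOuter s i out fuel = out ++ wordsB (s.drop i) := by
  intro fuel
  induction fuel with
  | zero =>
    intro i out hle
    have hd : s.drop i = [] := List.drop_eq_nil_of_le (by omega)
    simp [bOuter, hd, wordsB]
  | succ fuel ih =>
    intro i out hle
    by_cases h : i < s.length
    · have hj : bInner s (i + 1) (s.length - (i + 1)) =
          (i + 1) + (((s.drop (i + 1)).takeWhile (fun p => p.2 == "NotStart")).length) :=
        bInner_eq s (s.length - (i + 1)) (i + 1) (by omega)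
      have hdi : s.drop i = s[i] :: s.drop (i + 1) := List.drop_eq_getElem_cons h
      have htake : (s.drop i).take (bInner s (i + 1) (s.length - (i + 1)) - i)
          = s[i] :: (s.drop (i + 1)).takeWhile (fun p => p.2 == "NotStart") := by
        rw [hj]
        have h2 : (i + 1) + (((s.drop (i + 1)).takeWhile (fun p => p.2 == "NotStart")).length) - i
            = (((s.drop (i + 1)).takeWhile (fun p => p.2 == "NotStart")).length) + 1 := by omega
        rw [h2, hdi, List.take_succ_cons, take_takeWhile_len]
      have hdrop : s.drop (bInner s (i + 1) (s.length - (i + 1)))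
          = (s.drop (i + 1)).dropWhile (fun p => p.2 == "NotStart") := by
        rw [hj]
        have h3 : s.drop ((i + 1) + (((s.drop (i + 1)).takeWhile (fun p => p.2 == "NotStart")).length))
            = (s.drop (i + 1)).drop (((s.drop (i + 1)).takeWhile (fun p => p.2 == "NotStart")).length) := by
          rw [List.drop_drop]
        rw [h3, drop_takeWhile_len]
      have hrec := ih (bInner s (i + 1) (s.length - (i + 1)))
        (out ++ [(String.join (((s.drop i).take (bInner s (i + 1) (s.length - (i + 1)) - i)).map
            Prod.fst), (s.get ⟨i, h⟩).2)]) (by rw [hj]; omega)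
      simp only [bOuter, h, dif_pos]
      rw [hrec, htake, hdrop]
      conv_rhs => rw [hdi]
      show out ++ [_] ++ _ = out ++ wordsB (s[i] :: s.drop (i + 1))
      rw [wordsB]
      simp [join_cons]
    · have hd : s.drop i = [] := List.drop_eq_nil_of_le (by omega)
      simp [bOuter, h, hd, wordsB]

-- A-side: shift the accumulator out of the fold
def stepA (acc : List (String × String) × String × String) (p : String × String) :
    List (String × String) × String × String :=
  if p.2 == "NotStart" then (acc.1, acc.2.1 ++ p.1, acc.2.2)
  else (acc.1 ++ [(acc.2.1, acc.2.2)], p.1, p.2)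

theorem foldA_shift (l : List (String × String)) (acc : List (String × String))
    (w t : String) :
    l.foldl stepA (acc, w, t)
      = (acc ++ (l.foldl stepA ([], w, t)).1, (l.foldl stepA ([], w, t)).2) := by
  induction l generalizing acc w t with
  | nil => simp
  | cons p ps ih =>
    simp only [List.foldl_cons]
    by_cases h : p.2 == "NotStart"
    · simp only [stepA, h, if_pos]
      rw [ih]
    · simp only [stepA, h, if_neg, Bool.not_eq_true, List.nil_append]
      rw [ih (acc ++ [(w, t)]) p.1 p.2, ih [(w, t)] p.1 p.2]
      simp

theorem foldA_eq_wordsB (rest : List (String × String)) (c t : String) :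
    (rest.foldl stepA ([], c, t)).1 ++ [((rest.foldl stepA ([], c, t)).2.1,
      (rest.foldl stepA ([], c, t)).2.2)] = wordsB ((c, t) :: rest) := by
  induction rest generalizing c t with
  | nil =>
    simp [wordsB, String.join]
  | cons p ps ih =>
    obtain ⟨c', t'⟩ := p
    by_cases h : t' == "NotStart"
    · simp only [List.foldl_cons, stepA, h, if_pos]
      rw [ih]
      rw [wordsB, wordsB]
      rw [List.takeWhile_cons_of_pos (by simpa using h),
          List.dropWhile_cons_of_pos (by simpa using h)]
      simp [join_cons, String.append_assoc]
    · simp only [List.foldl_cons, stepA, h, if_neg, Bool.not_eq_true]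
      rw [foldA_shift]
      simp only [List.cons_append, List.nil_append]
      rw [wordsB]
      rw [List.takeWhile_cons_of_neg (by simpa using h),
          List.dropWhile_cons_of_neg (by simpa using h)]
      simp [ih, String.join]

-- ===== VERDICT (by name: the statement is the Claim_ definition above) =====
theorem ct2wt_spec : Claim_equal_ct2wt := by
  intro sentence _ hpre
  unfold Spec_ct2wt ct2wt ct2wt_alt
  match sentence with
  | [] => exact absurd rfl hpre
  | (c0, t0) :: rest =>
    rw [bOuter_eq _ _ 0 [] (by omega)]
    simp only [List.drop_zero, List.nil_append]
    have := foldA_eq_wordsB rest c0 t0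
    exact this.symm ▸ rfl
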